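-- pv_equiv track=rewrite | github.com/Qasim-Hussain-Code/ViralSeq-QC | src/qc.py | check_terminal_ns
-- ===== SOURCE A (Python) =====
-- from typing import Dict, List, Tuple
--
-- def check_terminal_ns(sequence: str, max_terminal_n: int = 10) -> Tuple[bool, Dict]:
--     """
--     Check for excessive N's at sequence termini (common assembly artifact).
--
--     Terminal N stretches often indicate:
--     - Low coverage at contig ends
--     - Assembly graph issues
--     - Primer binding regions with poor sequencing
--
--     Args:
--         sequence: The DNA sequence (case-insensitive).
--         max_terminal_n: Maximum allowed N's at each terminus.
--
--     Returns:
--         Tuple of (passes_check, details_dict):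
--         - passes_check: True if terminal N content is acceptable
--         - details_dict: Contains '5_prime_ns' and '3_prime_ns' counts
--
--     Example:
--         >>> check_terminal_ns("NNNATGCATGCNNN", max_terminal_n=5)
--         (True, {'5_prime_ns': 3, '3_prime_ns': 3})
--     """
--     if not sequence:
--         return True, {'5_prime_ns': 0, '3_prime_ns': 0}
--
--     seq_upper = sequence.upper()
--
--     # Count leading N's (5' end)
--     five_prime_ns = 0
--     for base in seq_upper:
--         if base == 'N':
--             five_prime_ns += 1
--         else:
--             break
--
--     # Count trailing N's (3' end)
--     three_prime_ns = 0
--     for base in reversed(seq_upper):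
--         if base == 'N':
--             three_prime_ns += 1
--         else:
--             break
--
--     details = {
--         '5_prime_ns': five_prime_ns,
--         '3_prime_ns': three_prime_ns
--     }
--
--     passes = five_prime_ns <= max_terminal_n and three_prime_ns <= max_terminal_n
--     return passes, details
-- ===== SOURCE B (Python) =====
-- from typing import Dict, Tuple
--
-- def check_terminal_ns(sequence: str, max_terminal_n: int = 10) -> Tuple[bool, Dict]:
--     if not sequence:
--         return True, {'5_prime_ns': 0, '3_prime_ns': 0}
--     # Single forward pass: track the current run of N's; the first run that ends
--     # is the 5' count, the run still open at the end is the 3' count.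
--     run = 0
--     five = 0
--     seen_non_n = False
--     for base in sequence:
--         if base == 'N' or base == 'n':
--             run += 1
--         else:
--             if not seen_non_n:
--                 five = run
--                 seen_non_n = True
--             run = 0
--     if not seen_non_n:          # all-N sequence: both termini are the whole string
--         five = run
--     three = run
--     details = {'5_prime_ns': five, '3_prime_ns': three}
--     return (five <= max_terminal_n and three <= max_terminal_n), details
-- ===== Notes on version B (the rewrite author's own statement) =====
-- stated objective: alternative
-- what changed: Replaces A's two staged scans (upper-case the string, a forward loop for the 5' count, a second loop over the reversed string for the 3' count) by one single forward pass with a run-length state machine (current N-run, first-run-ended flag), case handled per character; no upper(), no reversed().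
import Mathlib
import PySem

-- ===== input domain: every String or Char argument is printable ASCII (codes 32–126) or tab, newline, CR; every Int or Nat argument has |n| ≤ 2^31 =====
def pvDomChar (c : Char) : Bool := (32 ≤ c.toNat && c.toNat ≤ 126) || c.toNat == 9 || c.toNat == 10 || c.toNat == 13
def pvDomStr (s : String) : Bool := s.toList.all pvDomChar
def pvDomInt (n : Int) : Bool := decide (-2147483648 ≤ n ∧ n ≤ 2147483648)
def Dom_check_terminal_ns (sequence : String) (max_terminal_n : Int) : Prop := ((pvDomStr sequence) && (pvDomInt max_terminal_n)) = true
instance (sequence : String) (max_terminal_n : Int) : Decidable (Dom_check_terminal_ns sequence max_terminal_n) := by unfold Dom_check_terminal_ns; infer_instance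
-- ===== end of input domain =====

-- B replaces A's two staged scans (upper-case, forward loop, loop over the reversed string)
-- by one single forward pass with a run-length state machine; objective: alternative.

-- ===== PORT A =====
-- 'for base in u: if base == 'N': cnt += 1 else: break' — structural recursion stopping at the first non-'N'
def ctnLeadLoop : List Char → Int
  | [] => 0
  | c :: rest => if c == 'N' then 1 + ctnLeadLoop rest else 0

def check_terminal_ns (sequence : String) (max_terminal_n : Int) : Bool × (List (String × Int)) :=
  if sequence.toList = [] then
    (true, [("5_prime_ns", 0), ("3_prime_ns", 0)])
  else
    let seq_upper := PySem.Chars.upper sequence.toList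
    let five_prime_ns := ctnLeadLoop seq_upper
    let three_prime_ns := ctnLeadLoop seq_upper.reverse   -- reversed(seq_upper)
    (decide (five_prime_ns ≤ max_terminal_n) && decide (three_prime_ns ≤ max_terminal_n),
     [("5_prime_ns", five_prime_ns), ("3_prime_ns", three_prime_ns)])

-- ===== PORT B =====
-- one step of Source B's loop body on the state (run, five, seen_non_n)
def ctnStep : (Int × Int × Bool) → Char → (Int × Int × Bool)
  | (run, five, seen), c =>
    if c == 'N' || c == 'n' then (run + 1, five, seen)
    else (0, if seen then five else run, true)

def check_terminal_ns_alt (sequence : String) (max_terminal_n : Int) : Bool × (List (String × Int)) :=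
  if sequence.toList = [] then
    (true, [("5_prime_ns", 0), ("3_prime_ns", 0)])
  else
    let st := sequence.toList.foldl ctnStep (0, 0, false)
    let five : Int := if st.2.2 then st.2.1 else st.1   -- 'if not seen_non_n: five = run'
    let three : Int := st.1
    (decide (five ≤ max_terminal_n) && decide (three ≤ max_terminal_n),
     [("5_prime_ns", five), ("3_prime_ns", three)])

-- ===== PRECONDITION & SPEC =====
def Spec_check_terminal_ns (sequence : String) (max_terminal_n : Int) (out : Bool × (List (String × Int))) : Prop := out = check_terminal_ns_alt sequence max_terminal_n
instance (sequence : String) (max_terminal_n : Int) (out : Bool × (List (String × Int))) : Decidable (Spec_check_terminal_ns sequence max_terminal_n out) := by unfold Spec_check_terminal_ns; infer_instance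

-- ===== CLAIM (what is proved, stated in full; the proofs are below) =====
def Claim_equal_check_terminal_ns : Prop := ∀ (sequence : String) (max_terminal_n : Int), Dom_check_terminal_ns sequence max_terminal_n → Spec_check_terminal_ns sequence max_terminal_n (check_terminal_ns sequence max_terminal_n)

-- ===== LEMMAS AND PROOFS =====

-- leading run of N/n characters (count of the longest isNn-prefix)
def leadNn : List Char → Int
  | [] => 0
  | c :: rest => if c == 'N' || c == 'n' then 1 + leadNn rest else 0

theorem char_toNat_inj (a b : Char) (hn : a.toNat = b.toNat) : a = b := by
  apply Char.ext; exact UInt32.toNat_inj.mp hn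

theorem char_beq_toNat (a b : Char) : (a == b) = decide (a.toNat = b.toNat) := by
  by_cases h : a = b
  · subst h; simp
  · have : a.toNat ≠ b.toNat := fun hn => h (char_toNat_inj a b hn)
    simp [h, this]

-- upper-casing then comparing with 'N' is the per-character N/n test
theorem upperChar_eq_N (c : Char) : (PySem.Chars.upperChar c == 'N') = (c == 'N' || c == 'n') := by
  simp only [PySem.Chars.upperChar, PySem.Chars.islower]
  by_cases h : ('a' ≤ c ∧ c ≤ 'z')
  · have h1 : 97 ≤ c.toNat := h.1
    have h2 : c.toNat ≤ 122 := h.2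
    simp only [h, decide_true, if_pos, Bool.and_self]
    have hval : (c.toNat - 32).isValidChar := by constructor; omega
    have ht : (Char.ofNat (c.toNat - 32)).toNat = c.toNat - 32 := by
      rw [Char.toNat_ofNat, if_pos hval]
    rw [char_beq_toNat, char_beq_toNat c 'N', char_beq_toNat c 'n', ht]
    have hN : ('N' : Char).toNat = 78 := by decide
    have hn : ('n' : Char).toNat = 110 := by decide
    rw [hN, hn]
    by_cases hc : c.toNat = 110 <;> simp [hc] <;> omega
  · have hb : (decide ('a' ≤ c) && decide (c ≤ 'z')) = false := by
      rcases not_and_or.mp h with h' | h' <;> simp [h']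
    simp only [hb, if_neg, Bool.false_eq_true, not_false_eq_true]
    rw [char_beq_toNat c 'N', char_beq_toNat c 'n']
    have hN : ('N' : Char).toNat = 78 := by decide
    have hn : ('n' : Char).toNat = 110 := by decide
    rw [hN, hn]
    have hnot : c.toNat ≠ 110 := by
      intro hc
      exact h ⟨by change 97 ≤ c.toNat; omega, by change c.toNat ≤ 122; omega⟩
    simp [hnot]

-- A's forward loop over the upper-cased string computes leadNn of the raw string
theorem ctnLeadLoop_upper (cs : List Char) :
    ctnLeadLoop (PySem.Chars.upper cs) = leadNn cs := by
  induction cs with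
  | nil => rfl
  | cons c rest ih =>
    simp only [PySem.Chars.upper, List.map_cons, ctnLeadLoop, leadNn, upperChar_eq_N]
    rw [show PySem.Chars.upper rest = List.map PySem.Chars.upperChar rest from rfl] at ih
    rw [ih]

theorem leadNn_append (xs ys : List Char) :
    leadNn (xs ++ ys) =
      if xs.all (fun c => c == 'N' || c == 'n') then (xs.length : Int) + leadNn ys
      else leadNn xs := by
  induction xs with
  | nil => simp
  | cons c rest ih =>
    by_cases hc : (c == 'N' || c == 'n') = true
    · simp [leadNn, hc, ih]
      split_ifs <;> push_cast <;> ring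
    · simp [leadNn, hc]

theorem leadNn_all (cs : List Char) (h : cs.all (fun c => c == 'N' || c == 'n') = true) :
    leadNn cs = (cs.length : Int) := by
  induction cs with
  | nil => rfl
  | cons c rest ih =>
    simp only [List.all_cons, Bool.and_eq_true] at h
    simp [leadNn, h.1, ih h.2]
    ring

-- the invariant of B's single pass
theorem foldl_ctnStep (cs : List Char) (run five : Int) (seen : Bool) :
    cs.foldl ctnStep (run, five, seen) =
      if cs.all (fun c => c == 'N' || c == 'n')
      then (run + (cs.length : Int), five, seen)
      else (leadNn cs.reverse, (if seen then five else run + leadNn cs), true) := by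
  induction cs generalizing run five seen with
  | nil => simp
  | cons c rest ih =>
    by_cases hc : (c == 'N' || c == 'n') = true
    · rw [List.foldl_cons, show ctnStep (run, five, seen) c = (run + 1, five, seen) by
        simp [ctnStep, hc]]
      rw [ih]
      by_cases hr : rest.all (fun c => c == 'N' || c == 'n') = true
      · simp only [hr, if_pos, List.all_cons, hc, Bool.true_and, List.length_cons]
        push_cast
        ring_nf
      · have hr' : rest.all (fun x => x == 'N' || x == 'n') = false := by
          simpa using hr
        have hc' : ((c :: rest).all (fun x => x == 'N' || x == 'n')) = false := by
          simp [List.all_cons, hr']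
        have hrev : rest.reverse.all (fun x => x == 'N' || x == 'n') = false := by
          simp [List.all_reverse, hr']
        simp only [hr', hc', Bool.false_eq_true, if_false, List.reverse_cons,
          leadNn_append, hrev, leadNn, hc, if_true]
        split_ifs <;> simp <;> ring_nf
    · rw [List.foldl_cons, show ctnStep (run, five, seen) c = (0, if seen then five else run, true) by
        simp [ctnStep, hc]]
      rw [ih]
      have hall : ((c :: rest).all (fun c => c == 'N' || c == 'n')) = false := by
        simp [List.all_cons, hc]
      simp only [hall, Bool.false_eq_true, if_false, if_true, List.reverse_cons,
        leadNn_append]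
      have hlead : leadNn (c :: rest) = 0 := by simp [leadNn, hc]
      by_cases hr : rest.all (fun c => c == 'N' || c == 'n') = true
      · have : rest.reverse.all (fun c => c == 'N' || c == 'n') = true := by
          simp [List.all_reverse, hr]
        simp [hr, this, leadNn, hc]
      · have : rest.reverse.all (fun c => c == 'N' || c == 'n') = false := by
          simp [List.all_reverse, hr]
        simp [hr, this, hlead]

theorem ctn_eq (sequence : String) (max_terminal_n : Int) :
    check_terminal_ns sequence max_terminal_n = check_terminal_ns_alt sequence max_terminal_n := by
  unfold check_terminal_ns check_terminal_ns_alt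
  by_cases h : sequence.toList = []
  · simp [h]
  · simp only [h, if_false]
    rw [foldl_ctnStep]
    have h5 : ctnLeadLoop (PySem.Chars.upper sequence.toList) = leadNn sequence.toList :=
      ctnLeadLoop_upper _
    have h3 : ctnLeadLoop (PySem.Chars.upper sequence.toList).reverse
        = leadNn sequence.toList.reverse := by
      rw [show (PySem.Chars.upper sequence.toList).reverse
            = PySem.Chars.upper sequence.toList.reverse by
          simp [PySem.Chars.upper, List.map_reverse]]
      exact ctnLeadLoop_upper _
    by_cases hall : sequence.toList.all (fun c => c == 'N' || c == 'n') = true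
    · have hrall : sequence.toList.reverse.all (fun c => c == 'N' || c == 'n') = true := by
        simp [List.all_reverse, hall]
      simp [hall, h5, h3, leadNn_all _ hall, leadNn_all _ hrall]
    · simp [hall, h5, h3]

-- ===== VERDICT (by name: the statement is the Claim_ definition above) =====
theorem check_terminal_ns_spec : Claim_equal_check_terminal_ns := by
  intro sequence max_terminal_n _
  unfold Spec_check_terminal_ns
  exact ctn_eq sequence max_terminal_n
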